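-- pv_equiv track=rewrite | github.com/lixiang2017/leetcode | leetcode-cn/1332.0_Remove_Palindromic_Subsequences.py | removePalindromeSub
-- ===== SOURCE A (Python) =====
-- def removePalindromeSub(s: str) -> int:
--     def isPalindromic(s):
--         l, r = 0, len(s) - 1
--         while l <= r:
--             if s[l] == s[r]:
--                 l += 1
--                 r -= 1
--             else:
--                 return False
--         return True
--
--     return 1 if isPalindromic(s) else 2
-- ===== SOURCE B (Python) =====
-- def removePalindromeSub(s: str) -> int:
--     return 1 if s == s[::-1] else 2
-- ===== Notes on version B (the rewrite author's own statement) =====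
-- stated objective: idiomatic
-- what changed: Replaced the hand-written two-pointer inward scan (index bookkeeping with early exit) by the idiomatic bulk test s == s[::-1], which materializes a reversed copy once and compares whole strings.
import Mathlib
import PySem

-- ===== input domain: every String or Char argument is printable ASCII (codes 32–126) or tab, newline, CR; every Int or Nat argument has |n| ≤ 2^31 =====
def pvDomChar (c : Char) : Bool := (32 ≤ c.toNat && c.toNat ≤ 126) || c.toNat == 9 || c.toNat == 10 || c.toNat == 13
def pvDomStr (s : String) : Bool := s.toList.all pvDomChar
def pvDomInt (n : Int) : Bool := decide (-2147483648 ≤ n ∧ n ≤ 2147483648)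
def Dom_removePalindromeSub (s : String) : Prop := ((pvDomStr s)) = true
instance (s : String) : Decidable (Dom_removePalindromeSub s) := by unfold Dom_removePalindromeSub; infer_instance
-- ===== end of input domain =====

-- B replaces A's two-pointer inward scan by the idiomatic bulk test s == s[::-1] (reverse once, compare whole strings); equal return value on all inputs.


-- ===== PORT A =====
-- the inner 'while l <= r' loop of isPalindromic, on the same two indices
def pvIsPalGo (cs : List Char) (l r : Int) : Bool :=
  if l ≤ r then
    if PySem.List.pyGet? cs l == PySem.List.pyGet? cs r then
      pvIsPalGo cs (l + 1) (r - 1)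
    else false
  else true
termination_by (r + 1 - l).toNat
decreasing_by omega

def removePalindromeSub (s : String) : Int :=
  if pvIsPalGo s.toList 0 (PySem.Str.len s - 1) then 1 else 2

-- ===== PORT B =====
def removePalindromeSub_alt (s : String) : Int :=
  if s == (PySem.Str.slice? s none none (-1)).getD "" then 1 else 2

-- ===== PRECONDITION & SPEC =====
def Spec_removePalindromeSub (s : String) (out : Int) : Prop := out = removePalindromeSub_alt s
instance (s : String) (out : Int) : Decidable (Spec_removePalindromeSub s out) := by unfold Spec_removePalindromeSub; infer_instance

-- ===== CLAIM (what is proved, stated in full; the proofs are below) =====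
def Claim_equal_removePalindromeSub : Prop := ∀ (s : String), Dom_removePalindromeSub s → Spec_removePalindromeSub s (removePalindromeSub s)

-- ===== LEMMAS AND PROOFS =====

-- the two-pointer loop decides the symmetric-indices characterisation
theorem pvIsPalGo_iff (cs : List Char) :
    ∀ (k : Nat) (l r : Int), (r + 1 - l).toNat = k →
      (pvIsPalGo cs l r = true ↔
        ∀ i : Int, l ≤ i → i ≤ r →
          PySem.List.pyGet? cs i = PySem.List.pyGet? cs (l + r - i)) := by
  intro k
  induction k using Nat.strong_induction_on with
  | _ k ih =>
    intro l r hk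
    rw [pvIsPalGo]
    by_cases hlr : l ≤ r
    · simp only [hlr, if_true]
      have hih := ih (r - 1 + 1 - (l + 1)).toNat (by omega) (l + 1) (r - 1) rfl
      by_cases hc : PySem.List.pyGet? cs l = PySem.List.pyGet? cs r
      · simp only [hc, beq_self_eq_true, if_true, hih]
        constructor
        · intro h i hli hir
          by_cases hil : i = l
          · subst hil; simpa using hc
          · by_cases hirr : i = r
            · have e : l + r - i = l := by omega
              rw [e, hirr]; exact hc.symm
            · have := h i (by omega) (by omega)
              simpa using this
        · intro h i hli hir
          have e : l + 1 + (r - 1) - i = l + r - i := by omega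
          rw [e]
          exact h i (by omega) (by omega)
      · have hc' : (PySem.List.pyGet? cs l == PySem.List.pyGet? cs r) = false := by
          simpa using hc
        simp only [hc', Bool.false_eq_true, if_false]
        constructor
        · intro h; exact absurd h (by simp)
        · intro h
          have := h l (by omega) (by omega)
          have e : l + r - l = r := by omega
          rw [e] at this
          exact absurd this hc
    · simp only [hlr, if_false]
      constructor
      · intro _ i hli hir; omega
      · intro _; trivial

-- the same characterisation for "equals its reverse"
theorem reverse_iff (cs : List Char) :
    (cs = cs.reverse) ↔
      ∀ i : Int, 0 ≤ i → i ≤ (cs.length : Int) - 1 →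
        PySem.List.pyGet? cs i = PySem.List.pyGet? cs (0 + ((cs.length : Int) - 1) - i) := by
  constructor
  · intro h i h0 hi
    have hlt : i.toNat < cs.length := by omega
    have hj : 0 + ((cs.length : Int) - 1) - i = ((cs.length - 1 - i.toNat : Nat) : Int) := by omega
    rw [PySem.List.pyGet?_of_nonneg _ h0, hj, PySem.List.pyGet?_natCast]
    conv_lhs => rw [h]
    rw [List.getElem?_reverse hlt]
  · intro h
    apply List.ext_getElem?
    intro n
    by_cases hn : n < cs.length
    · rw [List.getElem?_reverse hn]
      have := h (n : Int) (by omega) (by omega)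
      rw [PySem.List.pyGet?_natCast] at this
      have hj : 0 + ((cs.length : Int) - 1) - (n : Int) = ((cs.length - 1 - n : Nat) : Int) := by
        omega
      rw [hj, PySem.List.pyGet?_natCast] at this
      exact this
    · rw [List.getElem?_eq_none (by omega), List.getElem?_eq_none (by simp; omega)]

theorem main_eq (s : String) : removePalindromeSub s = removePalindromeSub_alt s := by
  unfold removePalindromeSub removePalindromeSub_alt
  rw [PySem.Str.slice?_none_none_neg_one]
  simp only [Option.getD_some]
  have hlen : PySem.Str.len s = (s.toList.length : Int) := by simp [PySem.Str.len_eq]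
  rw [hlen]
  have hbeq : (s == String.ofList s.toList.reverse) = decide (s.toList = s.toList.reverse) := by
    rw [Bool.beq_eq_decide_eq, decide_eq_decide]
    constructor
    · intro h; conv_lhs => rw [h]; rw [String.toList_ofList]
    · intro h; conv_lhs => rw [← String.ofList_toList (s := s), h]
  simp only [hbeq]
  have hiff : pvIsPalGo s.toList 0 ((s.toList.length : Int) - 1) = true ↔
      s.toList = s.toList.reverse :=
    (pvIsPalGo_iff s.toList (((s.toList.length : Int) - 1) + 1 - 0).toNat 0
      ((s.toList.length : Int) - 1) rfl).trans (reverse_iff s.toList).symm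
  by_cases hp : s.toList = s.toList.reverse
  · rw [hiff.mpr hp, if_pos rfl, if_pos (decide_eq_true hp)]
  · rw [Bool.eq_false_iff.mpr (fun hT => hp (hiff.mp hT)),
        if_neg (by simp), if_neg (by simp [hp])]

-- ===== VERDICT (by name: the statement is the Claim_ definition above) =====
theorem removePalindromeSub_spec : Claim_equal_removePalindromeSub := by
  intro s _
  exact main_eq s
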